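-- pv_equiv track=rewrite | github.com/peterhardy22/2023_Code_Warriors | 03242023/04_07_Second_Occurence_Letter_String/python/find_index_for_second_occurrence_of_letter_in_string.py | second_symbol
-- ===== SOURCE A (Python) =====
-- def second_symbol(string: str, symbol: str) -> int:
--     letter_list: list = []
--
--     for index, char in enumerate(string):
--         if char == symbol and char not in letter_list:
--             letter_list.append(char)
--         elif char in letter_list:
--             return index
--
--     return -1
-- ===== SOURCE B (Python) =====
-- def second_symbol(string: str, symbol: str) -> int:
--     occurrences = [index for index, char in enumerate(string) if char == symbol]
--     return occurrences[1] if len(occurrences) >= 2 else -1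
-- ===== Notes on version B (the rewrite author's own statement) =====
-- stated objective: simpler
-- what changed: Replaces A's early-exit loop with a list-as-seen-set state by a collect-all-occurrence-indices comprehension followed by selecting the second index, or -1.
import Mathlib
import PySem

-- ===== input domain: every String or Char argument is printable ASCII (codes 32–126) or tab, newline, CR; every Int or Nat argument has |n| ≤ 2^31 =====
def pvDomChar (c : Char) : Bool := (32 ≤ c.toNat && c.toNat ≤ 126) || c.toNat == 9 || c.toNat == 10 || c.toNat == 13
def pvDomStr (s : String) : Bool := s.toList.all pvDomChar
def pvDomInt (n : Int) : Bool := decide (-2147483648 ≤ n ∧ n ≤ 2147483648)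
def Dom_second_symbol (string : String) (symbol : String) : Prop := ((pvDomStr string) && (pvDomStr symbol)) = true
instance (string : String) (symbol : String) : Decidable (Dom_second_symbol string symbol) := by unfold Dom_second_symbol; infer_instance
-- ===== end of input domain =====

-- B replaces A's early-exit loop with seen-list state by collecting all occurrence
-- indices once and selecting the second (objective: simpler).

-- ===== PORT A =====
-- the loop: state letter_list, early return on a repeat
def secondSymbolLoop (symbol : String) (pairs : List (Int × Char)) (letterList : List String) : Int :=
  match pairs with
  | [] => -1
  | (index, char) :: rest =>
    if String.ofList [char] == symbol && !(letterList.contains (String.ofList [char])) then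
      secondSymbolLoop symbol rest (letterList ++ [String.ofList [char]])
    else if letterList.contains (String.ofList [char]) then index
    else secondSymbolLoop symbol rest letterList

def second_symbol (string : String) (symbol : String) : Int :=
  secondSymbolLoop symbol (PySem.List.enumerate string.toList) []

-- ===== PORT B =====
def second_symbol_alt (string : String) (symbol : String) : Int :=
  let occurrences :=
    ((PySem.List.enumerate string.toList).filter (fun p => String.ofList [p.2] == symbol)).map (·.1)
  match occurrences with
  | _ :: j :: _ => j
  | _ => -1

-- ===== PRECONDITION & SPEC =====
def Spec_second_symbol (string : String) (symbol : String) (out : Int) : Prop := out = second_symbol_alt string symbol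
instance (string : String) (symbol : String) (out : Int) : Decidable (Spec_second_symbol string symbol out) := by unfold Spec_second_symbol; infer_instance

-- ===== CLAIM (what is proved, stated in full; the proofs are below) =====
def Claim_equal_second_symbol : Prop := ∀ (string : String) (symbol : String), Dom_second_symbol string symbol → Spec_second_symbol string symbol (second_symbol string symbol)

-- ===== LEMMAS AND PROOFS =====

-- occurrence indices among the remaining pairs
def occIdx (symbol : String) (pairs : List (Int × Char)) : List Int :=
  (pairs.filter (fun p => String.ofList [p.2] == symbol)).map (·.1)

theorem secondSymbolLoop_char :
    ∀ (symbol : String) (pairs : List (Int × Char)),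
      (secondSymbolLoop symbol pairs [] =
        (match occIdx symbol pairs with | _ :: j :: _ => j | _ => -1)) ∧
      (secondSymbolLoop symbol pairs [symbol] =
        (match occIdx symbol pairs with | j :: _ => j | _ => -1)) := by
  intro symbol pairs
  induction pairs with
  | nil => simp [secondSymbolLoop, occIdx]
  | cons p rest ih =>
    obtain ⟨i, c⟩ := p
    by_cases h : String.ofList [c] = symbol
    · refine ⟨?_, ?_⟩
      · simp only [secondSymbolLoop, occIdx, h, List.filter_cons, List.map_cons,
          beq_self_eq_true, List.contains_nil, Bool.not_false, Bool.and_self, if_true]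
        rw [List.nil_append, ih.2,
          show List.map (fun x => x.1) (List.filter (fun p => String.ofList [p.2] == symbol) rest)
            = occIdx symbol rest from rfl]
        rcases occIdx symbol rest with _ | ⟨j, t⟩ <;> rfl
      · simp [secondSymbolLoop, occIdx, h]
    · refine ⟨?_, ?_⟩
      · simpa [secondSymbolLoop, occIdx, h, List.filter_cons] using ih.1
      · have hc : (symbol == String.ofList [c]) = false := by
          simp; exact fun e => h e.symm
        simpa [secondSymbolLoop, occIdx, h, hc, List.filter_cons] using ih.2

-- ===== VERDICT (by name: the statement is the Claim_ definition above) =====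
theorem second_symbol_spec : Claim_equal_second_symbol := by
  intro string symbol _
  unfold Spec_second_symbol second_symbol second_symbol_alt
  simpa [occIdx] using (secondSymbolLoop_char symbol (PySem.List.enumerate string.toList)).1
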